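-- pv_equiv track=rewrite | github.com/Haddy1/ClusterMDS | libCluster.py | getIndexList
-- ===== SOURCE A (Python) =====
-- def getIndexList(labels, label_indices):
--     index_list = {}
--     for label in labels:
--         index_list[label] = []
--     for index, label in enumerate(label_indices):
--         if label in  labels:
--             index_list[label].append(index)
--     return index_list
-- ===== SOURCE B (Python) =====
-- def getIndexList(labels, label_indices):
--     return {label: [i for i, l in enumerate(label_indices) if l == label]
--             for label in labels}
-- ===== Notes on version B (the rewrite author's own statement) =====
-- stated objective: simpler
-- what changed: B inverts the loop nesting: instead of seeding a dict and appending while scanning indices with a membership test, it builds the result in a single dict comprehension over labels, computing each label's index list by an equality filter over enumerate(label_indices); no incremental dict state or membership test remains.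
import Mathlib
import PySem

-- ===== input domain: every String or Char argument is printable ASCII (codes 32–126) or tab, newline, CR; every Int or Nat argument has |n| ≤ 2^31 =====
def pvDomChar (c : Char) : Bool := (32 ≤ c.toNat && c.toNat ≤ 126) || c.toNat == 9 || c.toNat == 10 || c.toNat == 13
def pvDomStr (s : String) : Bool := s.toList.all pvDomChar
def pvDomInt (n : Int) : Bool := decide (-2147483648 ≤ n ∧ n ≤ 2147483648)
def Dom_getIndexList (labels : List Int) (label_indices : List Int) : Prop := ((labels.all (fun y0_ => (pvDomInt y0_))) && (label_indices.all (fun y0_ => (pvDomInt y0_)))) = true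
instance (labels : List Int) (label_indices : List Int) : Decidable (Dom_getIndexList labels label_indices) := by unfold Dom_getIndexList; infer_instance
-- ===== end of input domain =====

-- B inverts the loop nesting: one dict comprehension over labels, each entry computed by an
-- equality filter over enumerate(label_indices) — no seeded dict, appends or membership test
-- (objective: simpler; same asymptotic cost).

-- ===== PORT A =====
def getIndexList (labels : List Int) (label_indices : List Int) : List (Int × List Int) :=
  let d0 : PySem.Dict Int (List Int) :=
    labels.foldl (fun d label => d.insert label []) PySem.Dict.empty
  let d1 :=
    (PySem.List.enumerate label_indices).foldl
      (fun d p => if p.2 ∈ labels then d.modify p.2 [] (· ++ [p.1]) else d) d0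
  d1.items

-- ===== PORT B =====
-- dict comprehension over labels; the entry's value is the comprehension
-- [i for i, l in enumerate(label_indices) if l == label]
def getIndexList_alt (labels : List Int) (label_indices : List Int) : List (Int × List Int) :=
  (labels.foldl
    (fun d label => d.insert label
      (((PySem.List.enumerate label_indices).filter (fun p => p.2 == label)).map (·.1)))
    PySem.Dict.empty).items

-- ===== PRECONDITION & SPEC =====
def Spec_getIndexList (labels : List Int) (label_indices : List Int) (out : List (Int × List Int)) : Prop := out = getIndexList_alt labels label_indices
instance (labels : List Int) (label_indices : List Int) (out : List (Int × List Int)) : Decidable (Spec_getIndexList labels label_indices out) := by unfold Spec_getIndexList; infer_instance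

-- ===== CLAIM (what is proved, stated in full; the proofs are below) =====
def Claim_equal_getIndexList : Prop := ∀ (labels : List Int) (label_indices : List Int), Dom_getIndexList labels label_indices → Spec_getIndexList labels label_indices (getIndexList labels label_indices)

-- ===== LEMMAS AND PROOFS =====

-- a fold inserting values that do not depend on the accumulator: lookup afterwards
theorem getD_foldl_insert_const (v : Int → List Int) (l : List Int)
    (d : PySem.Dict Int (List Int)) (k : Int) :
    (l.foldl (fun d x => d.insert x (v x)) d).getD k [] =
      if k ∈ l then v k else d.getD k [] := by
  induction l generalizing d with
  | nil => simp
  | cons x xs ih =>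
    simp only [List.foldl_cons, ih, PySem.Dict.getD_insert, List.mem_cons]
    by_cases hxs : k ∈ xs <;> by_cases hkx : k = x <;> simp [hxs, hkx]

-- A's filtered append loop: keys unchanged, contains invariant preserved, lookups accumulate
theorem A_loop (labels : List Int) (L : List (Int × Int)) (d : PySem.Dict Int (List Int))
    (hc : ∀ c : Int, d.contains c = decide (c ∈ labels)) :
    ((L.foldl (fun d p => if p.2 ∈ labels then d.modify p.2 [] (· ++ [p.1]) else d) d).keys = d.keys)
    ∧ (∀ c : Int,
        (L.foldl (fun d p => if p.2 ∈ labels then d.modify p.2 [] (· ++ [p.1]) else d) d).getD c []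
          = d.getD c [] ++ ((L.filter (fun p => decide (p.2 ∈ labels) && p.2 == c)).map (·.1))) := by
  induction L generalizing d with
  | nil => simp
  | cons p L ih =>
    by_cases hp : p.2 ∈ labels
    · have hcontains : d.contains p.2 = true := by rw [hc]; simpa using hp
      have hkeys : (d.modify p.2 [] (· ++ [p.1])).keys = d.keys := by
        rw [PySem.Dict.keys_modify]
        exact PySem.Dict.keys_insert_of_contains d _ hcontains
      have hc' : ∀ c : Int, (d.modify p.2 [] (· ++ [p.1])).contains c = decide (c ∈ labels) := by
        intro c
        rw [PySem.Dict.contains_modify, hc]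
        by_cases hcp : c = p.2 <;> simp [hcp, hp]
      obtain ⟨ihk, ihg⟩ := ih (d.modify p.2 [] (· ++ [p.1])) hc'
      refine ⟨?_, ?_⟩
      · simp only [List.foldl_cons, if_pos hp]
        rw [ihk, hkeys]
      · intro c
        simp only [List.foldl_cons, if_pos hp]
        rw [ihg c, PySem.Dict.getD_modify, List.filter_cons]
        by_cases hcp : c = p.2
        · simp [hcp, hp, List.append_assoc]
        · have : (p.2 == c) = false := by simpa using fun h => hcp h.symm
          simp [hcp, this]
    · obtain ⟨ihk, ihg⟩ := ih d hc
      refine ⟨by simpa [hp] using ihk, ?_⟩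
      intro c
      simp only [List.foldl_cons, if_neg hp, List.filter_cons]
      have : (decide (p.2 ∈ labels) && (p.2 == c)) = false := by simp [hp]
      rw [this]
      exact ihg c

-- the common closed form of both results
theorem getIndexList_eq_canonical (labels label_indices : List Int) :
    getIndexList labels label_indices =
      (PySem.Set.ofList labels).map
        (fun k => (k, (((PySem.List.enumerate label_indices).filter (fun p => p.2 == k)).map (·.1)))) := by
  unfold getIndexList
  have hkeys0 : (labels.foldl (fun d label => d.insert label ([] : List Int)) PySem.Dict.empty).keys
      = PySem.Set.ofList labels := by
    rw [PySem.Dict.keys_foldl_insert]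
    simp [PySem.Set.update_nil_left]
  have hc0 : ∀ c : Int,
      (labels.foldl (fun d label => d.insert label ([] : List Int)) PySem.Dict.empty).contains c
        = decide (c ∈ labels) := by
    intro c
    rw [PySem.Dict.contains_eq_decide_mem_keys, hkeys0]
    simp [PySem.Set.mem_ofList]
  have hg0 : ∀ c : Int,
      (labels.foldl (fun d label => d.insert label ([] : List Int)) PySem.Dict.empty).getD c [] = [] := by
    intro c
    rw [getD_foldl_insert_const (fun _ => [])]
    simp
  obtain ⟨hk, hg⟩ := A_loop labels (PySem.List.enumerate label_indices) _ hc0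
  have hnd : (((PySem.List.enumerate label_indices).foldl
      (fun d p => if p.2 ∈ labels then d.modify p.2 [] (· ++ [p.1]) else d)
      (labels.foldl (fun d label => d.insert label ([] : List Int)) PySem.Dict.empty)).keys).Nodup := by
    rw [hk, hkeys0]; exact PySem.Set.nodup_ofList (xs := labels)
  rw [PySem.Dict.items_eq_map_keys _ hnd ([] : List Int), hk, hkeys0]
  apply List.map_congr_left
  intro k hkmem
  have hkl : k ∈ labels := by simpa [PySem.Set.mem_ofList] using hkmem
  rw [hg k, hg0 k]
  simp only [List.nil_append]
  congr 1
  congr 1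
  apply List.filter_congr
  intro p _
  by_cases hpc : p.2 = k
  · simp [hpc, hkl]
  · have : (p.2 == k) = false := by simpa using hpc
    simp [this]

theorem getIndexList_alt_eq_canonical (labels label_indices : List Int) :
    getIndexList_alt labels label_indices =
      (PySem.Set.ofList labels).map
        (fun k => (k, (((PySem.List.enumerate label_indices).filter (fun p => p.2 == k)).map (·.1)))) := by
  unfold getIndexList_alt
  have hkeys : ((labels.foldl (fun d label => d.insert label
      (((PySem.List.enumerate label_indices).filter (fun p => p.2 == label)).map (·.1)))
      PySem.Dict.empty).keys) = PySem.Set.ofList labels := by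
    rw [PySem.Dict.keys_foldl_insert]
    simp [PySem.Set.update_nil_left]
  have hnd := hkeys ▸ PySem.Set.nodup_ofList (xs := labels)
  rw [PySem.Dict.items_eq_map_keys _ hnd ([] : List Int), hkeys]
  apply List.map_congr_left
  intro k hkmem
  have hkl : k ∈ labels := by simpa [PySem.Set.mem_ofList] using hkmem
  rw [getD_foldl_insert_const]
  simp [hkl]

-- ===== VERDICT (by name: the statement is the Claim_ definition above) =====
theorem getIndexList_spec : Claim_equal_getIndexList := by
  intro labels label_indices _
  unfold Spec_getIndexList
  rw [getIndexList_eq_canonical, getIndexList_alt_eq_canonical]
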